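-- pv_equiv track=rewrite | github.com/bainelee/old_archives_sp | tools/scripts/virtual_random_rooms_connectivity_test.py | bfs_all_reachable
-- ===== SOURCE A (Python) =====
-- from collections import deque
--
-- def manhattan_adjacent(a: tuple[int, int], b: tuple[int, int]) -> bool:
--     return abs(a[0] - b[0]) + abs(a[1] - b[1]) == 1
--
-- def rooms_adjacent(cells_a: set[tuple[int, int]], cells_b: set[tuple[int, int]]) -> bool:
--     for x in cells_a:
--         for y in cells_b:
--             if manhattan_adjacent(x, y):
--                 return True
--     return False
--
-- def bfs_all_reachable(
--     id_cells: dict[str, set[tuple[int, int]]], start: str = "room_00"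
-- ) -> tuple[set[str], list[str]]:
--     ids = list(id_cells.keys())
--     neighbors: dict[str, list[str]] = {i: [] for i in ids}
--     for i, a in enumerate(ids):
--         for b in ids[i + 1 :]:
--             if rooms_adjacent(id_cells[a], id_cells[b]):
--                 neighbors[a].append(b)
--                 neighbors[b].append(a)
--     seen: set[str] = {start}
--     q: deque[str] = deque([start])
--     while q:
--         u = q.popleft()
--         for v in neighbors.get(u, []):
--             if v not in seen:
--                 seen.add(v)
--                 q.append(v)
--     missing = [rid for rid in ids if rid not in seen]
--     return seen, missing
-- ===== SOURCE B (Python) =====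
-- from collections import deque
--
--
-- def bfs_all_reachable(
--     id_cells: dict[str, set[tuple[int, int]]], start: str = "room_00"
-- ) -> tuple[set[str], list[str]]:
--     ids = list(id_cells)
--     # index every cell once: cell -> rooms containing it (in ids order)
--     cell_room: dict[tuple[int, int], list[str]] = {}
--     for rid in ids:
--         for c in id_cells[rid]:
--             cell_room[c] = cell_room.get(c, []) + [rid]
--     # a room's neighbours are the rooms owning one of its cells' 4 grid neighbours
--     neighbors: dict[str, list[str]] = {}
--     for rid in ids:
--         near: set[str] = set()
--         for (x, y) in id_cells[rid]:
--             for nb in ((x + 1, y), (x - 1, y), (x, y + 1), (x, y - 1)):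
--                 for other in cell_room.get(nb, []):
--                     if other != rid:
--                         near.add(other)
--         neighbors[rid] = [v for v in ids if v in near]
--     seen: set[str] = {start}
--     q: deque[str] = deque([start])
--     while q:
--         u = q.popleft()
--         for v in neighbors.get(u, []):
--             if v not in seen:
--                 seen.add(v)
--                 q.append(v)
--     missing = [rid for rid in ids if rid not in seen]
--     return seen, missing
-- ===== Notes on version B (the rewrite author's own statement) =====
-- stated objective: faster
-- what changed: Room adjacency is found by indexing every cell in a cell->rooms hash map and probing each cell's 4 grid neighbours, instead of testing all room pairs with a quadratic all-cells-vs-all-cells scan.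
import Mathlib
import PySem

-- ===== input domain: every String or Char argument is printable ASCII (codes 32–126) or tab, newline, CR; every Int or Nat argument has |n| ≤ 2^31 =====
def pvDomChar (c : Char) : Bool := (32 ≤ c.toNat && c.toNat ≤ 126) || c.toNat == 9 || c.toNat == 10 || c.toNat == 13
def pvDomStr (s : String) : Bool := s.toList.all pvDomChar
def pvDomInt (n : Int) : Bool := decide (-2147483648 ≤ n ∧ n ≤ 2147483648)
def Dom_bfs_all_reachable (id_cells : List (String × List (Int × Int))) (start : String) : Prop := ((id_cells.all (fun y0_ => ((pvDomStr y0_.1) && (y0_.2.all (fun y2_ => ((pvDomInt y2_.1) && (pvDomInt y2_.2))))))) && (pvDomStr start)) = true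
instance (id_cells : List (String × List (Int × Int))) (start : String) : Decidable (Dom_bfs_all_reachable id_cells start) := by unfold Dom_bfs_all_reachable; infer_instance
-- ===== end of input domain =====

-- B replaces A's all-pairs × all-cells-vs-all-cells adjacency scan by a cell→rooms index probed
-- at each cell's 4 grid neighbours (objective: faster; measured).

-- ===== PORT A =====
def manhattan_adjacent (a b : Int × Int) : Bool :=
  ((a.1 - b.1).natAbs + (a.2 - b.2).natAbs == 1)   -- abs(a0-b0)+abs(a1-b1) == 1, exact on Int

def rooms_adjacent (cells_a cells_b : List (Int × Int)) : Bool :=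
  cells_a.any (fun x => cells_b.any (fun y => manhattan_adjacent x y))

-- the while-q loop; fuel = ids.length + 1 dequeues always suffices: every enqueue adds a fresh
-- element to seen and seen ⊆ {start} ∪ ids, so the queue empties before the fuel runs out.
def bfsLoopA (nb : PySem.Dict String (List String)) : Nat → PySem.Set String → List String → PySem.Set String
  | 0, seen, _ => seen
  | _ + 1, seen, [] => seen
  | fuel + 1, seen, u :: rest =>
    let sq := (nb.getD u []).foldl
      (fun (sq : PySem.Set String × List String) v =>
        if PySem.Set.contains sq.1 v then sq else (PySem.Set.add sq.1 v, sq.2 ++ [v]))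
      (seen, rest)
    bfsLoopA nb fuel sq.1 sq.2

def bfs_all_reachable (id_cells : List (String × List (Int × Int))) (start : String) : List String × List String :=
  let d := PySem.Dict.ofList id_cells
  let ids := d.keys
  let neighbors0 : PySem.Dict String (List String) := ids.foldl (fun m i => m.insert i []) PySem.Dict.empty
  let neighbors := (PySem.List.enumerate ids).foldl
    (fun nb ia =>
      (PySem.List.slice ids (some (ia.1 + 1)) none).foldl
        (fun nb b =>
          if rooms_adjacent (d.getD ia.2 []) (d.getD b []) then
            (nb.modify ia.2 [] (fun l => l ++ [b])).modify b [] (fun l => l ++ [ia.2])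
          else nb)
        nb)
    neighbors0
  let seen := bfsLoopA neighbors (ids.length + 1) (PySem.Set.ofList [start]) [start]
  (seen, ids.filter (fun rid => !(PySem.Set.contains seen rid)))

-- ===== PORT B =====
def cellNbrs (c : Int × Int) : List (Int × Int) :=
  [(c.1 + 1, c.2), (c.1 - 1, c.2), (c.1, c.2 + 1), (c.1, c.2 - 1)]

def bfsLoopB (nb : PySem.Dict String (List String)) : Nat → PySem.Set String → List String → PySem.Set String
  | 0, seen, _ => seen
  | _ + 1, seen, [] => seen
  | fuel + 1, seen, u :: rest =>
    let sq := (nb.getD u []).foldl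
      (fun (sq : PySem.Set String × List String) v =>
        if PySem.Set.contains sq.1 v then sq else (PySem.Set.add sq.1 v, sq.2 ++ [v]))
      (seen, rest)
    bfsLoopB nb fuel sq.1 sq.2

def bfs_all_reachable_alt (id_cells : List (String × List (Int × Int))) (start : String) : List String × List String :=
  let d := PySem.Dict.ofList id_cells
  let ids := d.keys
  let cellRoom : PySem.Dict (Int × Int) (List String) :=
    ids.foldl (fun cr rid =>
      (d.getD rid []).foldl (fun cr c => cr.modify c [] (fun l => l ++ [rid])) cr) PySem.Dict.empty
  let neighbors : PySem.Dict String (List String) :=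
    ids.foldl (fun nb rid =>
      let near : PySem.Set String :=
        (d.getD rid []).foldl (fun s c =>
          (cellNbrs c).foldl (fun s n =>
            (cellRoom.getD n []).foldl
              (fun s other => if other == rid then s else PySem.Set.add s other) s) s)
          PySem.Set.empty
      nb.insert rid (ids.filter (fun v => PySem.Set.contains near v)))
      PySem.Dict.empty
  let seen := bfsLoopB neighbors (ids.length + 1) (PySem.Set.ofList [start]) [start]
  (seen, ids.filter (fun rid => !(PySem.Set.contains seen rid)))

-- ===== PRECONDITION & SPEC =====
def Spec_bfs_all_reachable (id_cells : List (String × List (Int × Int))) (start : String) (out : List String × List String) : Prop := out = bfs_all_reachable_alt id_cells start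
instance (id_cells : List (String × List (Int × Int))) (start : String) (out : List String × List String) : Decidable (Spec_bfs_all_reachable id_cells start out) := by unfold Spec_bfs_all_reachable; infer_instance

-- ===== CLAIM (what is proved, stated in full; the proofs are below) =====
def Claim_equal_bfs_all_reachable : Prop := ∀ (id_cells : List (String × List (Int × Int))) (start : String), Dom_bfs_all_reachable id_cells start → Spec_bfs_all_reachable id_cells start (bfs_all_reachable id_cells start)

-- ===== LEMMAS AND PROOFS =====

-- the canonical neighbour row both constructions are shown to produce
def nrow (d : PySem.Dict String (List (Int × Int))) (ids : List String) (u : String) : List String :=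
  ids.filter (fun v => !(v == u) && rooms_adjacent (d.getD u []) (d.getD v []))

-- the sequence of (key, appended value) events A's pair loop performs
def evList (d : PySem.Dict String (List (Int × Int))) : List String → List (String × String)
  | [] => []
  | a :: t =>
    t.flatMap (fun b => if rooms_adjacent (d.getD a []) (d.getD b []) then [(a, b), (b, a)] else [])
      ++ evList d t

theorem manhattan_symm (x y : Int × Int) : manhattan_adjacent x y = manhattan_adjacent y x := by
  simp only [manhattan_adjacent]
  have h1 : (x.1 - y.1).natAbs = (y.1 - x.1).natAbs := by omega
  have h2 : (x.2 - y.2).natAbs = (y.2 - x.2).natAbs := by omega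
  rw [h1, h2]

theorem adj_iff (A B : List (Int × Int)) :
    rooms_adjacent A B = true ↔ ∃ x ∈ A, ∃ y ∈ B, manhattan_adjacent x y = true := by
  simp [rooms_adjacent, List.any_eq_true]

theorem adj_symm (A B : List (Int × Int)) : rooms_adjacent A B = rooms_adjacent B A := by
  rw [Bool.eq_iff_iff, adj_iff, adj_iff]
  constructor <;> rintro ⟨x, hx, y, hy, h⟩ <;> exact ⟨y, hy, x, hx, by rw [manhattan_symm]; exact h⟩

theorem manhattan_mem_nbrs (x y : Int × Int) : manhattan_adjacent x y = true ↔ y ∈ cellNbrs x := by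
  obtain ⟨x1, x2⟩ := x; obtain ⟨y1, y2⟩ := y
  simp [manhattan_adjacent, cellNbrs, Prod.ext_iff]
  omega

-- generic: a guarded loop doing several modifies is the fold over its event list
theorem foldl_guard_events {β γ δ : Type} (l : List β) (p : β → Bool) (e : β → List γ)
    (g : δ → γ → δ) (acc : δ) :
    l.foldl (fun acc b => if p b then (e b).foldl g acc else acc) acc
      = (l.flatMap (fun b => if p b then e b else [])).foldl g acc := by
  induction l generalizing acc with
  | nil => rfl
  | cons a t ih =>
    simp only [List.foldl_cons, List.flatMap_cons, List.foldl_append]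
    by_cases h : p a = true <;> simp [h, ih]

theorem mem_evList {d : PySem.Dict String (List (Int × Int))} {l : List String}
    {p : String × String} (hp : p ∈ evList d l) : p.1 ∈ l ∧ p.2 ∈ l := by
  induction l with
  | nil => simp [evList] at hp
  | cons a t ih =>
    simp only [evList, List.mem_append, List.mem_flatMap] at hp
    rcases hp with ⟨b, hb, hif⟩ | h
    · split at hif
      · simp only [List.mem_cons, List.not_mem_nil, or_false] at hif
        rcases hif with rfl | rfl <;> simp [hb]
      · simp at hif
    · have := ih h; exact ⟨List.mem_cons_of_mem _ this.1, List.mem_cons_of_mem _ this.2⟩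

-- A's nested enumerate/slice loop performs exactly the events of evList
theorem loopA_eq_events (d : PySem.Dict String (List (Int × Int)))
    (pre suf : List String) (nb : PySem.Dict String (List String)) :
    (PySem.List.enumerate suf (pre.length : Int)).foldl
      (fun nb ia =>
        (PySem.List.slice (pre ++ suf) (some (ia.1 + 1)) none).foldl
          (fun nb b =>
            if rooms_adjacent (d.getD ia.2 []) (d.getD b []) then
              (nb.modify ia.2 [] (fun l => l ++ [b])).modify b [] (fun l => l ++ [ia.2])
            else nb)
          nb)
      nb
    = (evList d suf).foldl (fun nb p => nb.modify p.1 [] (fun l => l ++ [p.2])) nb := by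
  induction suf generalizing pre nb with
  | nil => rw [PySem.List.enumerate_nil]; rfl
  | cons a t ih =>
    rw [PySem.List.enumerate_cons, List.foldl_cons, evList, List.foldl_append]
    have hsl : PySem.List.slice (pre ++ a :: t) (some ((pre.length : Int) + 1)) none = t := by
      have h0 : (0:Int) ≤ (pre.length : Int) + 1 := by omega
      rw [PySem.List.slice_from _ h0]
      have h1 : ((pre.length : Int) + 1).toNat = (pre ++ [a]).length := by simp
      rw [h1, show pre ++ a :: t = (pre ++ [a]) ++ t by simp, List.drop_left]
    have hstep : (fun (nb : PySem.Dict String (List String)) (b : String) =>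
          if rooms_adjacent (d.getD a []) (d.getD b []) then
            (nb.modify a [] (fun l => l ++ [b])).modify b [] (fun l => l ++ [a])
          else nb)
        = (fun nb b =>
          if rooms_adjacent (d.getD a []) (d.getD b []) then
            ([(a, b), (b, a)]).foldl (fun nb p => nb.modify p.1 [] (fun l => l ++ [p.2])) nb
          else nb) := rfl
    show (PySem.List.enumerate t ((pre.length : Int) + 1)).foldl _
        ((PySem.List.slice (pre ++ a :: t) (some ((pre.length : Int) + 1)) none).foldl _ nb) = _
    rw [hsl]
    rw [hstep, foldl_guard_events]
    have h2 : ((pre.length : Int) + 1) = (((pre ++ [a]).length : Int)) := by simp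
    have h3 : pre ++ a :: t = (pre ++ [a]) ++ t := by simp
    rw [h2, h3, ih]

-- membership in B's `near` set
theorem mem_nearF1 (rid : String) (l : List String) (s : PySem.Set String) (v : String) :
    v ∈ l.foldl (fun s other => if other == rid then s else PySem.Set.add s other) s
      ↔ v ∈ s ∨ (v ∈ l ∧ v ≠ rid) := by
  induction l generalizing s with
  | nil => simp
  | cons o t ih =>
    simp only [List.foldl_cons]
    by_cases h : (o == rid) = true
    · have ho : o = rid := by simpa using h
      subst ho
      rw [if_pos h, ih]
      constructor
      · rintro (hs | ⟨hm, hne⟩)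
        · exact Or.inl hs
        · exact Or.inr ⟨List.mem_cons_of_mem _ hm, hne⟩
      · rintro (hs | ⟨hm, hne⟩)
        · exact Or.inl hs
        · rcases List.mem_cons.1 hm with rfl | hm
          · exact absurd rfl hne
          · exact Or.inr ⟨hm, hne⟩
    · have ho : ¬ o = rid := by simpa using h
      rw [if_neg h, ih]
      constructor
      · rintro (hs | ⟨hm, hne⟩)
        · rcases (PySem.Set.mem_add s o v).1 hs with hs | rfl
          · exact Or.inl hs
          · exact Or.inr ⟨List.mem_cons_self, ho⟩
        · exact Or.inr ⟨List.mem_cons_of_mem _ hm, hne⟩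
      · rintro (hs | ⟨hm, hne⟩)
        · exact Or.inl ((PySem.Set.mem_add s o v).2 (Or.inl hs))
        · rcases List.mem_cons.1 hm with rfl | hm
          · exact Or.inl ((PySem.Set.mem_add s v v).2 (Or.inr rfl))
          · exact Or.inr ⟨hm, hne⟩

theorem mem_nearF2 (cellRoom : PySem.Dict (Int × Int) (List String)) (rid : String)
    (ns : List (Int × Int)) (s : PySem.Set String) (v : String) :
    v ∈ ns.foldl (fun s n =>
        (cellRoom.getD n []).foldl
          (fun s other => if other == rid then s else PySem.Set.add s other) s) s
      ↔ v ∈ s ∨ ∃ n ∈ ns, v ∈ cellRoom.getD n [] ∧ v ≠ rid := by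
  induction ns generalizing s with
  | nil => simp
  | cons n t ih =>
    rw [List.foldl_cons, ih, mem_nearF1]
    constructor
    · rintro ((hs | ⟨hv, hne⟩) | ⟨m, hmt, hv, hne⟩)
      · exact Or.inl hs
      · exact Or.inr ⟨n, List.mem_cons_self, hv, hne⟩
      · exact Or.inr ⟨m, List.mem_cons_of_mem _ hmt, hv, hne⟩
    · rintro (hs | ⟨m, hmm, hv, hne⟩)
      · exact Or.inl (Or.inl hs)
      · rcases List.mem_cons.1 hmm with rfl | hmt
        · exact Or.inl (Or.inr ⟨hv, hne⟩)
        · exact Or.inr ⟨m, hmt, hv, hne⟩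

theorem mem_nearF3 (cellRoom : PySem.Dict (Int × Int) (List String)) (rid : String)
    (cells : List (Int × Int)) (v : String) :
    v ∈ cells.foldl (fun s c =>
        (cellNbrs c).foldl (fun s n =>
          (cellRoom.getD n []).foldl
            (fun s other => if other == rid then s else PySem.Set.add s other) s) s)
        PySem.Set.empty
      ↔ ∃ c ∈ cells, ∃ n ∈ cellNbrs c, v ∈ cellRoom.getD n [] ∧ v ≠ rid := by
  have H : ∀ (cells : List (Int × Int)) (s : PySem.Set String),
      v ∈ cells.foldl (fun s c =>
          (cellNbrs c).foldl (fun s n =>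
            (cellRoom.getD n []).foldl
              (fun s other => if other == rid then s else PySem.Set.add s other) s) s) s
        ↔ v ∈ s ∨ ∃ c ∈ cells, ∃ n ∈ cellNbrs c, v ∈ cellRoom.getD n [] ∧ v ≠ rid := by
    intro cells
    induction cells with
    | nil => simp
    | cons c t ih =>
      intro s
      rw [List.foldl_cons, ih, mem_nearF2]
      constructor
      · rintro ((hs | ⟨n, hn, hv, hne⟩) | ⟨c', hct, hrest⟩)
        · exact Or.inl hs
        · exact Or.inr ⟨c, List.mem_cons_self, n, hn, hv, hne⟩
        · exact Or.inr ⟨c', List.mem_cons_of_mem _ hct, hrest⟩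
      · rintro (hs | ⟨c', hcm, hrest⟩)
        · exact Or.inl (Or.inl hs)
        · rcases List.mem_cons.1 hcm with rfl | hct
          · exact Or.inl (Or.inr hrest)
          · exact Or.inr ⟨c', hct, hrest⟩
  rw [H]
  simp [PySem.Set.empty]

-- B's cell→rooms map: membership characterisation
theorem mem_cellRoom (d : PySem.Dict String (List (Int × Int))) (ids : List String)
    (c : Int × Int) (r : String) :
    r ∈ (ids.foldl (fun cr rid =>
          (d.getD rid []).foldl (fun cr c => cr.modify c [] (fun l => l ++ [rid])) cr)
          (PySem.Dict.empty : PySem.Dict (Int × Int) (List String))).getD c []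
      ↔ r ∈ ids ∧ c ∈ d.getD r [] := by
  have hflat : (ids.foldl (fun cr rid =>
          (d.getD rid []).foldl (fun cr c => cr.modify c [] (fun l => l ++ [rid])) cr)
          (PySem.Dict.empty : PySem.Dict (Int × Int) (List String)))
      = (ids.flatMap (fun rid => (d.getD rid []).map (fun c => (c, rid)))).foldl
          (fun cr p => cr.modify p.1 [] (fun l => l ++ [p.2])) PySem.Dict.empty := by
    rw [List.foldl_flatMap]
    congr 1
    funext cr rid
    rw [List.foldl_map]
  rw [hflat, PySem.Dict.getD_foldl_modify_append, PySem.Dict.getD_empty, List.nil_append]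
  simp only [List.mem_map, List.mem_filter, List.mem_flatMap, beq_iff_eq]
  constructor
  · rintro ⟨⟨c', r'⟩, ⟨⟨rid, hrid, ⟨c'', hc'', h2⟩⟩, hc⟩, hr⟩
    cases h2
    simp only at hc hr
    subst hc; subst hr
    exact ⟨hrid, hc''⟩
  · rintro ⟨hr, hc⟩
    exact ⟨(c, r), ⟨⟨r, hr, ⟨c, hc, rfl⟩⟩, rfl⟩, rfl⟩

-- the combinatorial core: A's event stream filtered at u is the canonical row
theorem flatMap_if_singleton {α : Type} (l : List α) (p : α → Bool) :
    l.flatMap (fun b => if p b then [b] else []) = l.filter p := by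
  induction l with
  | nil => rfl
  | cons a t ih => by_cases h : p a <;> simp [h, ih]

theorem flatMap_if_eq_single {α γ : Type} [DecidableEq α] (t : List α) (ht : t.Nodup)
    (u : α) (hu : u ∈ t) (f : α → List γ) :
    t.flatMap (fun b => if b = u then f b else []) = f u := by
  induction t with
  | nil => cases hu
  | cons a s ih =>
    rcases List.mem_cons.1 hu with h | hus
    · replace h := h.symm; subst h
      have has : a ∉ s := (List.nodup_cons.1 ht).1
      have hrest : s.flatMap (fun b => if b = a then f b else []) = [] := by
        rw [List.flatMap_eq_nil_iff]
        intro b hb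
        rw [if_neg (by rintro rfl; exact has hb)]
      rw [List.flatMap_cons, if_pos rfl, hrest, List.append_nil]
    · have hne : a ≠ u := by rintro rfl; exact (List.nodup_cons.1 ht).1 hus
      simp only [List.flatMap_cons, if_neg hne, List.nil_append]
      exact ih (List.nodup_cons.1 ht).2 hus

theorem events_filter_eq_nrow (d : PySem.Dict String (List (Int × Int)))
    (l : List String) (hl : l.Nodup) (u : String) (hu : u ∈ l) :
    ((evList d l).filter (fun p => p.1 == u)).map (fun p => p.2) = nrow d l u := by
  induction l with
  | nil => cases hu
  | cons a t ih =>
    have hat : a ∉ t := (List.nodup_cons.1 hl).1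
    have htnd : t.Nodup := (List.nodup_cons.1 hl).2
    rw [evList, List.filter_append, List.map_append, List.filter_flatMap, List.map_flatMap]
    rcases List.mem_cons.1 hu with h | hut
    · replace h := h.symm; subst h
      -- u = a : the tail events never mention a
      have htail : (evList d t).filter (fun p => p.1 == a) = [] := by
        rw [List.filter_eq_nil_iff]
        intro p hp h
        exact hat ((beq_iff_eq.1 h) ▸ (mem_evList hp).1)
      have hblock : t.flatMap (fun b =>
            ((if rooms_adjacent (d.getD a []) (d.getD b []) then [(a, b), (b, a)] else []).filter
              (fun p => p.1 == a)).map (fun p => p.2))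
          = t.filter (fun b => rooms_adjacent (d.getD a []) (d.getD b [])) := by
        rw [← flatMap_if_singleton t (fun b => rooms_adjacent (d.getD a []) (d.getD b []))]
        apply List.flatMap_congr
        intro b hb
        have hba : ¬ (b == a) = true := by simp; rintro rfl; exact hat hb
        by_cases h : rooms_adjacent (d.getD a []) (d.getD b []) = true <;>
          simp [h, List.filter, hba]
      rw [htail, List.map_nil, List.append_nil, hblock]
      unfold nrow
      rw [List.filter_cons]
      simp only [BEq.rfl, Bool.not_true, Bool.false_and, if_neg (by simp : ¬ (false = true))]
      apply (List.filter_congr _).symm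
      intro v hv
      have hva : ¬ (v == a) = true := by simp; rintro rfl; exact hat hv
      simp [hva]
    · -- u ∈ t
      have hau : a ≠ u := by rintro rfl; exact hat hut
      have hblock : t.flatMap (fun b =>
            ((if rooms_adjacent (d.getD a []) (d.getD b []) then [(a, b), (b, a)] else []).filter
              (fun p => p.1 == u)).map (fun p => p.2))
          = if rooms_adjacent (d.getD a []) (d.getD u []) then [a] else [] := by
        rw [← flatMap_if_eq_single t htnd u hut
          (fun b => if rooms_adjacent (d.getD a []) (d.getD b []) then [a] else [])]
        apply List.flatMap_congr
        intro b hb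
        have hba : ¬ (a == u) = true := by simpa using hau
        by_cases hbu : b = u
        · subst hbu
          by_cases h : rooms_adjacent (d.getD a []) (d.getD b []) = true <;>
            simp [h, List.filter, hba]
        · have h2 : ¬ (b == u) = true := by simpa using hbu
          by_cases h : rooms_adjacent (d.getD a []) (d.getD b []) = true <;>
            simp [h, List.filter, hba, h2, hbu]
      rw [hblock, ih htnd hut]
      unfold nrow
      rw [List.filter_cons]
      have hpa : (!(a == u) && rooms_adjacent (d.getD u []) (d.getD a []))
          = rooms_adjacent (d.getD a []) (d.getD u []) := by
        rw [adj_symm]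
        simp [hau]
      rw [hpa]
      split <;> simp

-- A's finished neighbour dict
theorem neighborsA_items (d : PySem.Dict String (List (Int × Int))) (hn : d.keys.Nodup) :
    ((PySem.List.enumerate d.keys).foldl
      (fun nb ia =>
        (PySem.List.slice d.keys (some (ia.1 + 1)) none).foldl
          (fun nb b =>
            if rooms_adjacent (d.getD ia.2 []) (d.getD b []) then
              (nb.modify ia.2 [] (fun l => l ++ [b])).modify b [] (fun l => l ++ [ia.2])
            else nb)
          nb)
      (d.keys.foldl (fun m i => m.insert i []) PySem.Dict.empty)).items
    = d.keys.map (fun u => (u, nrow d d.keys u)) := by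
  have h0items : (d.keys.foldl (fun m i => m.insert i ([] : List String)) PySem.Dict.empty).items
      = d.keys.map (fun u => (u, ([] : List String))) := by
    have h := PySem.Dict.items_foldl_insert_fresh d.keys (fun i => i)
      (fun _ => ([] : List String)) PySem.Dict.empty
      (by intro a _; exact PySem.Dict.contains_empty a) (by simpa using hn)
    simpa using h
  have h0keys : (d.keys.foldl (fun m i => m.insert i ([] : List String)) PySem.Dict.empty).keys
      = d.keys := by
    rw [PySem.Dict.keys_foldl_insert, PySem.Dict.keys_empty, PySem.Set.update_nil_left,
      PySem.Set.ofList_eq_self_of_nodup _ hn]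
  have h0nodup : (d.keys.foldl (fun m i => m.insert i ([] : List String)) PySem.Dict.empty).keys.Nodup :=
    h0keys.symm ▸ hn
  have h0getD : ∀ u, (d.keys.foldl (fun m i => m.insert i ([] : List String)) PySem.Dict.empty).getD u [] = [] := by
    intro u
    by_cases hu : u ∈ d.keys
    · have hmem0 : (u, ([] : List String)) ∈
          (d.keys.foldl (fun m i => m.insert i ([] : List String)) PySem.Dict.empty).items := by
        rw [h0items]; exact List.mem_map.2 ⟨u, hu, rfl⟩
      exact PySem.Dict.getD_of_mem_items _ hmem0 h0nodup []
    · apply PySem.Dict.getD_of_not_contains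
      rw [PySem.Dict.contains_eq_decide_mem_keys, h0keys]
      simpa using hu
  have hflat := loopA_eq_events d [] d.keys
    (d.keys.foldl (fun m i => m.insert i ([] : List String)) PySem.Dict.empty)
  simp only [List.nil_append, List.length_nil, Nat.cast_zero] at hflat
  rw [hflat]
  have hkeys : ((evList d d.keys).foldl (fun nb p => nb.modify p.1 [] (fun l => l ++ [p.2]))
      (d.keys.foldl (fun m i => m.insert i ([] : List String)) PySem.Dict.empty)).keys = d.keys := by
    rw [PySem.Dict.keys_foldl_modify_key (evList d d.keys) (fun p => p.1) []
      (fun _ p => fun l => l ++ [p.2]), h0keys, PySem.Set.update_eq_append_filter]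
    have hnil : List.filter (fun y => !PySem.Set.contains d.keys y)
        (PySem.Set.ofList ((evList d d.keys).map (fun p => p.1))) = [] := by
      rw [List.filter_eq_nil_iff]
      intro y hy
      have hy' : y ∈ (evList d d.keys).map (fun p => p.1) := (PySem.Set.mem_ofList _ _).1 hy
      obtain ⟨p, hp, rfl⟩ := List.mem_map.1 hy'
      have hmem := (mem_evList hp).1
      simpa using hmem
    rw [hnil, List.append_nil]
  have hgetD : ∀ u ∈ d.keys, ((evList d d.keys).foldl (fun nb p => nb.modify p.1 [] (fun l => l ++ [p.2]))
      (d.keys.foldl (fun m i => m.insert i ([] : List String)) PySem.Dict.empty)).getD u []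
      = nrow d d.keys u := by
    intro u hu
    rw [PySem.Dict.getD_foldl_modify_append, h0getD, List.nil_append]
    exact events_filter_eq_nrow d d.keys hn u hu
  rw [PySem.Dict.items_eq_map_keys _ (hkeys.symm ▸ hn) ([] : List String), hkeys]
  exact List.map_congr_left (fun u hu => by rw [hgetD u hu])

-- B's finished neighbour dict
theorem neighborsB_items (d : PySem.Dict String (List (Int × Int))) (hn : d.keys.Nodup) :
    (d.keys.foldl (fun nb rid =>
      nb.insert rid (d.keys.filter (fun v => PySem.Set.contains ((d.getD rid []).foldl (fun s c =>
          (cellNbrs c).foldl (fun s n =>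
            (((d.keys.foldl (fun cr rid =>
                (d.getD rid []).foldl (fun cr c => cr.modify c [] (fun l => l ++ [rid])) cr)
                PySem.Dict.empty).getD n [])).foldl
              (fun s other => if other == rid then s else PySem.Set.add s other) s) s)
          PySem.Set.empty) v)))
      PySem.Dict.empty).items
    = d.keys.map (fun u => (u, nrow d d.keys u)) := by
  have h := PySem.Dict.items_foldl_insert_fresh d.keys (fun i => i)
    (fun rid => d.keys.filter (fun v => PySem.Set.contains ((d.getD rid []).foldl (fun s c =>
          (cellNbrs c).foldl (fun s n =>
            (((d.keys.foldl (fun cr rid =>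
                (d.getD rid []).foldl (fun cr c => cr.modify c [] (fun l => l ++ [rid])) cr)
                PySem.Dict.empty).getD n [])).foldl
              (fun s other => if other == rid then s else PySem.Set.add s other) s) s)
          PySem.Set.empty) v))
    PySem.Dict.empty (fun a _ => PySem.Dict.contains_empty a) (by simpa using hn)
  simp only at h
  rw [h]
  have hempty : (PySem.Dict.empty : PySem.Dict String (List String)).items = [] := rfl
  rw [hempty, List.nil_append]
  apply List.map_congr_left
  intro u hu
  have hrow : d.keys.filter (fun v => PySem.Set.contains
      ((d.getD u []).foldl (fun s c =>
          (cellNbrs c).foldl (fun s n =>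
            (((d.keys.foldl (fun cr rid =>
                (d.getD rid []).foldl (fun cr c => cr.modify c [] (fun l => l ++ [rid])) cr)
                PySem.Dict.empty).getD n [])).foldl
              (fun s other => if other == u then s else PySem.Set.add s other) s) s)
          PySem.Set.empty) v) = nrow d d.keys u := by
    apply List.filter_congr
    intro v hv
    rw [Bool.eq_iff_iff]
    rw [PySem.Set.contains_iff, mem_nearF3]
    simp only [Bool.and_eq_true, Bool.not_eq_true', beq_eq_false_iff_ne, adj_iff]
    constructor
    · rintro ⟨c, hc, n, hn4, hvr, hne⟩
      have hcr := (mem_cellRoom d d.keys n v).1 hvr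
      exact ⟨hne, c, hc, n, hcr.2, (manhattan_mem_nbrs c n).2 hn4⟩
    · rintro ⟨hne, x, hx, y, hy, hman⟩
      exact ⟨x, hx, y, (manhattan_mem_nbrs x y).1 hman,
        (mem_cellRoom d d.keys y v).2 ⟨hv, hy⟩, hne⟩
  rw [hrow]

theorem bfsLoop_eq (nb : PySem.Dict String (List String)) (fuel : Nat)
    (seen : PySem.Set String) (q : List String) :
    bfsLoopA nb fuel seen q = bfsLoopB nb fuel seen q := by
  induction fuel generalizing seen q with
  | zero => rfl
  | succ f ih => cases q <;> simp [bfsLoopA, bfsLoopB, ih]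

theorem neighbors_eq (d : PySem.Dict String (List (Int × Int))) (hn : d.keys.Nodup) :
    ((PySem.List.enumerate d.keys).foldl
      (fun nb ia =>
        (PySem.List.slice d.keys (some (ia.1 + 1)) none).foldl
          (fun nb b =>
            if rooms_adjacent (d.getD ia.2 []) (d.getD b []) then
              (nb.modify ia.2 [] (fun l => l ++ [b])).modify b [] (fun l => l ++ [ia.2])
            else nb)
          nb)
      (d.keys.foldl (fun m i => m.insert i []) PySem.Dict.empty))
    = (d.keys.foldl (fun nb rid =>
      nb.insert rid (d.keys.filter (fun v => PySem.Set.contains ((d.getD rid []).foldl (fun s c =>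
          (cellNbrs c).foldl (fun s n =>
            (((d.keys.foldl (fun cr rid =>
                (d.getD rid []).foldl (fun cr c => cr.modify c [] (fun l => l ++ [rid])) cr)
                PySem.Dict.empty).getD n [])).foldl
              (fun s other => if other == rid then s else PySem.Set.add s other) s) s)
          PySem.Set.empty) v)))
      PySem.Dict.empty) :=
  PySem.Dict.ext (by rw [neighborsA_items d hn, neighborsB_items d hn])

-- ===== VERDICT (by name: the statement is the Claim_ definition above) =====
theorem bfs_all_reachable_spec : Claim_equal_bfs_all_reachable := by
  intro id_cells start _
  unfold Spec_bfs_all_reachable bfs_all_reachable bfs_all_reachable_alt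
  dsimp only
  rw [neighbors_eq (PySem.Dict.ofList id_cells) (PySem.Dict.nodup_keys_ofList id_cells),
    bfsLoop_eq]
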